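-- pv_equiv track=rewrite | github.com/Naveeng7/foobar-with-google | foobar2.1.py | solution
-- ===== SOURCE A (Python) =====
-- def solution(x, y):
--     # Your code here
--
--     vd = 0
--     for i in range(1, x + 1):
--         vd = vd + i
--
--     lst = list()
--     hv = 1
--     for i in range(0, y + 1):
--         hv = i + hv
--         lst.append(hv)
--
--     lst1 = list()
--     for i in range(len(lst) - 1):
--         diff = lst[i + 1] - lst[i]
--         lst1.append(diff)
--
--     for i in range(1, y):
--         nele = lst1[i - 1]
--         nele = nele + (x - 1)
--         vd = vd + nele
--
--     return str(vd)
-- ===== SOURCE B (Python) =====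
-- def solution(x, y):
--     # closed form: triangular number for the first column plus an arithmetic
--     # series for the walk along the row; O(1) instead of A's O(x+y) loops
--     tri = x * (x + 1) // 2 if x > 0 else 0
--     extra = (y - 1) * (y + 2 * x - 2) // 2 if y > 1 else 0
--     return str(tri + extra)
-- ===== Notes on version B (the rewrite author's own statement) =====
-- stated objective: faster
-- what changed: Replaced the four loops (triangular sum, prefix list, difference list, row walk) by two closed-form arithmetic expressions: x(x+1)/2 plus the arithmetic-series sum (y-1)(y+2x-2)/2.
import Mathlib
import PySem

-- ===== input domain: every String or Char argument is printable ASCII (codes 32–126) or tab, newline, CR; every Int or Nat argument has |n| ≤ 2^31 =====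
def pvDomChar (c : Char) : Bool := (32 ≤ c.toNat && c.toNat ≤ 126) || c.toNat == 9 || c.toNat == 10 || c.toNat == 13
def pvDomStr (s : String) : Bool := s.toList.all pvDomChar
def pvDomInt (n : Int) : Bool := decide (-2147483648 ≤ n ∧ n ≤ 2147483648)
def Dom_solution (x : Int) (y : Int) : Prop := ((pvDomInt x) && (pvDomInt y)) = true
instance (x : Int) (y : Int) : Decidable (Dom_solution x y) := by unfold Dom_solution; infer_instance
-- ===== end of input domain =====

-- B replaces A's four loops by two closed-form arithmetic expressions (objective: faster).

-- ===== PORT A =====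
def solution (x : Int) (y : Int) : String :=
  let vd := (PySem.List.pyRange 1 (x + 1) 1).foldl (fun acc i => acc + i) 0
  let p := (PySem.List.pyRange 0 (y + 1) 1).foldl
    (fun (p : Int × List Int) i => (i + p.1, p.2 ++ [i + p.1])) (1, ([] : List Int))
  let lst := p.2
  let lst1 := (PySem.List.pyRange 0 ((lst.length : Int) - 1) 1).foldl
    (fun acc i => acc ++ [PySem.List.pyGetD lst (i + 1) 0 - PySem.List.pyGetD lst i 0])
    ([] : List Int)
  let vd2 := (PySem.List.pyRange 1 y 1).foldl
    (fun acc i => acc + (PySem.List.pyGetD lst1 (i - 1) 0 + (x - 1))) vd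
  PySem.Int.toStr vd2

-- ===== PORT B =====
def solution_alt (x : Int) (y : Int) : String :=
  let tri := if x > 0 then PySem.Int.floordiv (x * (x + 1)) 2 else 0
  let extra := if y > 1 then PySem.Int.floordiv ((y - 1) * (y + 2 * x - 2)) 2 else 0
  PySem.Int.toStr (tri + extra)

-- ===== PRECONDITION & SPEC =====
def Spec_solution (x : Int) (y : Int) (out : String) : Prop := out = solution_alt x y
instance (x : Int) (y : Int) (out : String) : Decidable (Spec_solution x y out) := by unfold Spec_solution; infer_instance

-- ===== CLAIM (what is proved, stated in full; the proofs are below) =====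
def Claim_equal_solution : Prop := ∀ (x : Int) (y : Int), Dom_solution x y → Spec_solution x y (solution x y)

-- ===== LEMMAS AND PROOFS =====

-- Σ_{i<n} i as an Int (the running value of A's second-loop accumulator, minus 1)
def triS : Nat → Int
  | 0 => 0
  | n + 1 => triS n + n

-- A's summing loops: twice 'init + Σ_{i=a}^{a+m-1} (i + c)' in closed form
lemma foldl_add_pyRange (a c init : Int) (m : Nat) :
    2 * ((PySem.List.pyRange a (a + (m : Int)) 1).foldl (fun acc i => acc + (i + c)) init)
      = 2 * init + m * (2 * (a + c) + m - 1) := by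
  induction m with
  | zero => simp [PySem.List.pyRange_one_eq_nil]
  | succ n ih =>
    have h : a + ((n + 1 : Nat) : Int) = (a + n) + 1 := by push_cast; ring
    rw [h, PySem.List.pyRange_one_succ_right (by omega), List.foldl_append]
    simp only [List.foldl]
    push_cast
    linear_combination ih

-- A's second loop: the running (hv, lst) pair in closed form
lemma loop2_eq (n : Nat) :
    (PySem.List.pyRange 0 (n : Int) 1).foldl
      (fun (p : Int × List Int) i => (i + p.1, p.2 ++ [i + p.1])) (1, ([] : List Int))
    = (1 + triS n, (List.range n).map (fun k => 1 + triS (k + 1))) := by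
  induction n with
  | zero => simp [PySem.List.pyRange_one_eq_nil, triS]
  | succ m ih =>
    have h : ((m + 1 : Nat) : Int) = (m : Int) + 1 := by push_cast; ring
    rw [h, PySem.List.pyRange_one_succ_right (by positivity), List.foldl_append, ih,
      List.range_succ, List.map_append]
    simp only [List.foldl, List.map, Prod.mk.injEq]
    refine ⟨by simp only [triS]; ring, ?_⟩
    simp only [List.append_cancel_left_eq, List.cons.injEq, and_true, triS]
    ring

-- A's third loop input: lst1 is [1, 2, …, y]
lemma lst1_eq (n : Nat) :
    (PySem.List.pyRange 0 (n : Int) 1).foldl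
      (fun acc i => acc ++ [PySem.List.pyGetD ((List.range (n + 1)).map (fun k => 1 + triS (k + 1))) (i + 1) 0
        - PySem.List.pyGetD ((List.range (n + 1)).map (fun k => 1 + triS (k + 1))) i 0])
      ([] : List Int)
    = (List.range n).map (fun (k : Nat) => ((k : Int) + 1)) := by
  rw [PySem.List.foldl_append_singleton_eq_map]
  simp only [List.nil_append]
  apply List.ext_getElem
  · simp [PySem.List.length_pyRange_one]
  · intro k h1 h2
    simp only [List.getElem_map, PySem.List.getElem_pyRange_one, zero_add]
    have hk : k < n := by
      have := h1; simpa [PySem.List.length_pyRange_one] using this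
    have e1 : ((k : Int) + 1) = ((k + 1 : Nat) : Int) := by push_cast; ring
    rw [e1, PySem.List.pyGetD_natCast, PySem.List.pyGetD_natCast,
      List.getD_eq_getElem _ _ (by simp; omega), List.getD_eq_getElem _ _ (by simp; omega)]
    simp only [List.getElem_map, List.getElem_range, List.getElem_range]
    simp only [triS]
    push_cast
    ring

lemma solution_eq_alt (x y : Int) : solution x y = solution_alt x y := by
  unfold solution solution_alt
  -- first loop = tri
  have hvd : 2 * ((PySem.List.pyRange 1 (x + 1) 1).foldl (fun acc i => acc + i) 0)
      = (x.toNat : Int) * ((x.toNat : Int) + 1) := by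
    by_cases hx : 0 < x
    · have h1 : (x : Int) + 1 = 1 + (x.toNat : Int) := by omega
      rw [h1, show (fun (acc i : Int) => acc + i) = (fun (acc i : Int) => acc + (i + 0)) from by
        funext a b; ring, foldl_add_pyRange 1 0 0 x.toNat]
      ring
    · have : x + 1 ≤ 1 := by omega
      rw [PySem.List.pyRange_one_eq_nil this]
      have : (x.toNat : Int) = 0 := by omega
      simp [this]
  set vd := (PySem.List.pyRange 1 (x + 1) 1).foldl (fun acc i => acc + i) 0 with hvddef
  have htri : vd = (if x > 0 then PySem.Int.floordiv (x * (x + 1)) 2 else 0) := by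
    by_cases hx : 0 < x
    · have hxn : (x.toNat : Int) = x := by omega
      rw [hxn] at hvd
      simp only [hx, if_true]
      have := PySem.Int.floordiv_eq_iff_of_pos (a := x * (x + 1)) (b := 2) (q := vd) (by omega)
      symm
      rw [this]
      constructor <;> nlinarith [hvd]
    · simp only [hx, if_false]
      have hxn : (x.toNat : Int) = 0 := by omega
      rw [hxn] at hvd
      omega
  by_cases hy : 1 < y
  · -- second loop: lst, with n = y.toNat
    have hyn : (y + 1) = ((y.toNat + 1 : Nat) : Int) := by omega
    rw [hyn, loop2_eq (y.toNat + 1)]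
    simp only
    have hlen : (((List.range (y.toNat + 1)).map (fun k => 1 + triS (k + 1))).length : Int) - 1
        = (y.toNat : Int) := by simp
    rw [hlen, lst1_eq y.toNat]
    -- third loop: replace the indexed body by 'i + (x-1)'
    have hbody : ∀ (acc i : Int), i ∈ PySem.List.pyRange 1 y 1 →
        acc + (PySem.List.pyGetD ((List.range y.toNat).map (fun (k : Nat) => ((k : Int) + 1))) (i - 1) 0 + (x - 1))
        = acc + (i + (x - 1)) := by
      intro acc i hi
      rw [PySem.List.mem_pyRange_one] at hi
      have h1 : (i - 1) = (((i - 1).toNat : Nat) : Int) := by omega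
      rw [h1, PySem.List.pyGetD_natCast,
        List.getD_eq_getElem _ _ (by simp; omega)]
      simp only [List.getElem_map, List.getElem_range]
      omega
    rw [PySem.List.foldl_congr_mem _ _ _ _ hbody]
    have hy2 : (y : Int) = 1 + ((y - 1).toNat : Int) := by omega
    have hsum := foldl_add_pyRange 1 (x - 1) vd (y - 1).toNat
    rw [← hy2] at hsum
    -- final arithmetic
    congr 1
    set L := (PySem.List.pyRange 1 y 1).foldl (fun acc i => acc + (i + (x - 1))) vd with hL
    have hm : ((y - 1).toNat : Int) = y - 1 := by omega
    rw [hm] at hsum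
    have hflo : PySem.Int.floordiv ((y - 1) * (y + 2 * x - 2)) 2 = L - vd := by
      rw [PySem.Int.floordiv_eq_iff_of_pos (by omega)]
      constructor <;> nlinarith [hsum]
    rw [if_pos hy, hflo, ← htri]
    ring
  · -- third loop empty
    have h3 : PySem.List.pyRange 1 y 1 = [] := PySem.List.pyRange_one_eq_nil (by omega)
    simp only [h3, List.foldl_nil]
    have hif : (if y > 1 then PySem.Int.floordiv ((y - 1) * (y + 2 * x - 2)) 2 else 0) = 0 := by
      simp [hy]
    rw [hif, htri, add_zero]

-- ===== VERDICT (by name: the statement is the Claim_ definition above) =====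
theorem solution_spec : Claim_equal_solution := by
  intro x y _
  unfold Spec_solution
  exact solution_eq_alt x y
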